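-- pv_equiv track=rewrite | github.com/vini-muchulski/Studies | Py/exercicios/hacker_rank_ibm/questao_1.py | playSegments
-- ===== SOURCE A (Python) =====
-- def playSegments(coins):
--     n = len(coins)
--     player_1_score = 0
--     player_2_score = sum(coins) - (n - sum(coins))
--
--     for i in range(n):
--         if player_1_score > player_2_score:
--             return i
--
--         player_1_score += 2 * coins[i] - 1
--         player_2_score -= 2 * coins[i] - 1
--
--     return n
-- ===== SOURCE B (Python) =====
-- def playSegments(coins):
--     n = len(coins)
--     T = 2 * sum(coins) - n
--     # Divide and conquer on the index range: first index i in [lo, hi) where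
--     # player 1's lead flips, i.e. 4*prefix(i) > T + 2*i (prefix passed in as pre);
--     # also returns the segment sum so the right half knows its starting prefix.
--     def first_overtake(lo, hi, pre):
--         if lo == hi:
--             return None, 0
--         if hi - lo == 1:
--             hit = lo if 4 * pre > T + 2 * lo else None
--             return hit, coins[lo]
--         mid = (lo + hi) // 2
--         hit, s1 = first_overtake(lo, mid, pre)
--         if hit is not None:
--             return hit, s1
--         hit, s2 = first_overtake(mid, hi, pre + s1)
--         return hit, s1 + s2
--     hit, _ = first_overtake(0, n, 0)
--     return hit if hit is not None else n
-- ===== Notes on version B (the rewrite author's own statement) =====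
-- stated objective: alternative
-- what changed: Replaces A's left-to-right loop over two mutually-updating player scores by a divide-and-conquer recursion that splits the index range in half, returning the first overtake index (via the reduced inequality 4*prefix > 2*S - n + 2*i) together with each segment's sum so the right half knows its starting prefix.
import Mathlib
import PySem

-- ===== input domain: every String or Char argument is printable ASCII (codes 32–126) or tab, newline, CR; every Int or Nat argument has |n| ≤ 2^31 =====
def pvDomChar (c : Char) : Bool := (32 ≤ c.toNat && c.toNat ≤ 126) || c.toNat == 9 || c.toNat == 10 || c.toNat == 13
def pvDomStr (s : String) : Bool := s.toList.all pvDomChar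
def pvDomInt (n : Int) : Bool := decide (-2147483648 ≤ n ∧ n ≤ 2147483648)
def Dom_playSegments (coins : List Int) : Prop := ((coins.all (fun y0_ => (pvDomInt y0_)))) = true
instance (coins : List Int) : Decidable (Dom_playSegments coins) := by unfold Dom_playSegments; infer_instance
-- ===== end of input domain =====

-- B replaces A's left-to-right loop of two mutually-updating scores by a divide-and-conquer
-- recursion on the index range (objective: alternative decomposition, same cost).

-- ===== PORT A =====
-- for i in range(n): test p1 > p2 and return i, else consume coins[i] updating both scores
def playSegmentsGo (cs : List Int) (i p1 p2 : Int) : Int :=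
  match cs with
  | [] => i
  | c :: rest =>
      if p1 > p2 then i
      else playSegmentsGo rest (i + 1) (p1 + (2 * c - 1)) (p2 - (2 * c - 1))

def playSegments (coins : List Int) : Int :=
  let n : Int := coins.length
  let s : Int := coins.sum
  playSegmentsGo coins 0 0 (s - (n - s))

-- ===== PORT B =====
-- first_overtake on a segment (the Python indexes coins[lo:hi]; the port carries the segment
-- itself, split in half exactly where the Python splits the index range): returns the first
-- index with 4*prefix > T + 2*i, if any, paired with the segment's sum
def pvDNC (cs : List Int) (lo : Int) (pre : Int) (T : Int) : Option Int × Int :=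
  match cs with
  | [] => (none, 0)
  | [c] => ((if 4 * pre > T + 2 * lo then some lo else none), c)
  | c1 :: c2 :: rest =>
      let full := c1 :: c2 :: rest
      let mid := full.length / 2
      match pvDNC (full.take mid) lo pre T with
      | (some i, s1) => (some i, s1)
      | (none, s1) =>
          let res := pvDNC (full.drop mid) (lo + (mid : Int)) (pre + s1) T
          (res.1, s1 + res.2)
termination_by cs.length
decreasing_by
  · simp; omega
  · simp; omega

def playSegments_alt (coins : List Int) : Int :=
  let n : Int := coins.length
  let T : Int := 2 * coins.sum - n
  ((pvDNC coins 0 0 T).1).getD n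

-- ===== PRECONDITION & SPEC =====
def Spec_playSegments (coins : List Int) (out : Int) : Prop := out = playSegments_alt coins
instance (coins : List Int) (out : Int) : Decidable (Spec_playSegments coins out) := by unfold Spec_playSegments; infer_instance

-- ===== CLAIM (what is proved, stated in full; the proofs are below) =====
def Claim_equal_playSegments : Prop := ∀ (coins : List Int), Dom_playSegments coins → Spec_playSegments coins (playSegments coins)

-- ===== LEMMAS AND PROOFS =====
-- linear reference scan used only by the proofs: first index with 4*pre > T + 2*lo
def pvScan (cs : List Int) (lo pre T : Int) : Option Int :=
  match cs with
  | [] => none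
  | c :: rest => if 4 * pre > T + 2 * lo then some lo else pvScan rest (lo + 1) (pre + c) T

theorem pvScan_append (l r : List Int) : ∀ (lo pre T : Int),
    pvScan (l ++ r) lo pre T
      = match pvScan l lo pre T with
        | some i => some i
        | none => pvScan r (lo + l.length) (pre + l.sum) T := by
  induction l with
  | nil => intro lo pre T; simp [pvScan]
  | cons c rest ih =>
      intro lo pre T
      simp only [List.cons_append, pvScan]
      by_cases h : 4 * pre > T + 2 * lo
      · simp [h]
      · rw [if_neg h, if_neg h, ih]
        have : lo + 1 + (rest.length : Int) = lo + ((c :: rest).length : Int) := by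
          simp; omega
        have hs : pre + c + rest.sum = pre + (c :: rest).sum := by simp; ring
        rw [this, hs]

theorem pvDNC_eq (m : Nat) : ∀ (cs : List Int), cs.length ≤ m → ∀ (lo pre T : Int),
    (pvDNC cs lo pre T).1 = pvScan cs lo pre T ∧
    (pvScan cs lo pre T = none → (pvDNC cs lo pre T).2 = cs.sum) := by
  induction m with
  | zero =>
      intro cs hlen lo pre T
      have : cs = [] := List.length_eq_zero_iff.mp (Nat.le_zero.mp hlen)
      subst this; simp [pvDNC, pvScan]
  | succ m ih =>
      intro cs hlen lo pre T
      match cs with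
      | [] => simp [pvDNC, pvScan]
      | [c] =>
          by_cases h : 4 * pre > T + 2 * lo <;> simp [pvDNC, pvScan, h]
      | c1 :: c2 :: rest =>
          rw [pvDNC.eq_def]
          dsimp only
          set full : List Int := c1 :: c2 :: rest with hfull
          have hflen : full.length = rest.length + 2 := by simp [hfull]
          set mid := full.length / 2 with hmid
          have hmid1 : 1 ≤ mid := by omega
          have hmidlt : mid < full.length := by omega
          have htake : (full.take mid).length = mid := by
            simp [List.length_take]; omega
          have h1 : (full.take mid).length ≤ m := by omega
          have h2 : (full.drop mid).length ≤ m := by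
            simp [List.length_drop]; omega
          have hsplit : full.take mid ++ full.drop mid = full := List.take_append_drop mid full
          have hscan := pvScan_append (full.take mid) (full.drop mid) lo pre T
          rw [hsplit, htake] at hscan
          have hsum : (full.take mid).sum + (full.drop mid).sum = full.sum := by
            rw [← List.sum_append, hsplit]
          rcases hdt : pvDNC (full.take mid) lo pre T with ⟨o1, s1⟩
          have iht := ih _ h1 lo pre T
          rw [hdt] at iht
          obtain ⟨ho1, hs1⟩ := iht
          cases o1 with
          | some i =>
              simp only at ho1 hs1 ⊢
              simp only [hscan, ← ho1]
              exact ⟨trivial, fun hcon => absurd hcon (by simp)⟩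
          | none =>
              simp only at ho1 hs1 ⊢
              have hs1' : s1 = (full.take mid).sum := hs1 ho1.symm
              have ihd := ih _ h2 (lo + (mid : Int)) (pre + s1) T
              obtain ⟨ho2, hs2⟩ := ihd
              rw [hs1'] at ho2 hs2 ⊢
              simp only [hscan, ← ho1]
              constructor
              · exact ho2
              · intro hcon
                rw [hs2 hcon, hsum]

theorem pvGo_eq_scan (cs : List Int) : ∀ (i acc T : Int),
    playSegmentsGo cs i (2 * acc - i) (T - (2 * acc - i))
      = (pvScan cs i acc T).getD (i + cs.length) := by
  induction cs with
  | nil => intro i acc T; simp [playSegmentsGo, pvScan]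
  | cons c rest ih =>
      intro i acc T
      simp only [playSegmentsGo, pvScan]
      by_cases h : 4 * acc > T + 2 * i
      · rw [if_pos (by omega), if_pos h]; simp
      · rw [if_neg (by omega), if_neg h]
        have harg1 : 2 * acc - i + (2 * c - 1) = 2 * (acc + c) - (i + 1) := by ring
        have harg2 : T - (2 * acc - i) - (2 * c - 1) = T - (2 * (acc + c) - (i + 1)) := by ring
        rw [harg1, harg2, ih (i + 1) (acc + c) T]
        congr 1
        simp [List.length_cons]
        omega

-- ===== VERDICT (by name: the statement is the Claim_ definition above) =====
theorem playSegments_spec : Claim_equal_playSegments := by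
  intro coins _
  unfold Spec_playSegments playSegments playSegments_alt
  simp only []
  rw [(pvDNC_eq coins.length coins (le_refl _) 0 0 _).1]
  rw [show (coins.sum - ((coins.length : Int) - coins.sum))
        = 2 * coins.sum - (coins.length : Int) - (2 * 0 - 0) by ring]
  simpa using pvGo_eq_scan coins 0 0 (2 * coins.sum - (coins.length : Int))
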